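-- pv_equiv track=rewrite | github.com/hoohyeon/T | 250319/Carry 피하기 2/escaping-carry-2.py | f
-- ===== SOURCE A (Python) =====
-- def f(x, y, z):
--
--     while x > 0 or y > 0 or z > 0:
--
--         x, dx = divmod(x, 10)
--         y, dy = divmod(y, 10)
--         z, dz = divmod(z, 10)
--
--         if dx + dy + dz >= 10:
--             return True
--
--     return False
-- ===== SOURCE B (Python) =====
-- def f(x, y, z):
--     # Build the column representation first (the place values that A's loop
--     # would visit), then test all columns with a single any() pass; the
--     # original numbers are never consumed.
--     m = max(x, y, z)
--     powers = []
--     p = 1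
--     while p <= m:
--         powers.append(p)
--         p *= 10
--     return any(x // p % 10 + y // p % 10 + z // p % 10 >= 10 for p in powers)
-- ===== Notes on version B (the rewrite author's own statement) =====
-- stated objective: alternative
-- what changed: Instead of destructively divmod-ing all three numbers inside the carry test, B first builds the list of place values 1,10,100,... up to max(x,y,z) and then answers with one any() pass over those columns, indexing the untouched inputs with floor division.
import Mathlib
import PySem

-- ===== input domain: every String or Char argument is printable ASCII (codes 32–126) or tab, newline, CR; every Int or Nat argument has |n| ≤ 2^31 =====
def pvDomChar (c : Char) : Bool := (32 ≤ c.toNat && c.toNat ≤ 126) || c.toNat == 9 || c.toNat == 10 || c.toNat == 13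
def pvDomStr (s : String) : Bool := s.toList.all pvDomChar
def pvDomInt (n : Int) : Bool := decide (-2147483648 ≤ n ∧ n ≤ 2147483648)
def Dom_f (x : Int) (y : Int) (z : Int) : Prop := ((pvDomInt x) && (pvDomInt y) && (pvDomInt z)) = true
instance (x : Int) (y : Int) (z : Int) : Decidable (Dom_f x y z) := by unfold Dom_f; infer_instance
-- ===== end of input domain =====

-- B builds the list of decimal place values up to max(x,y,z) first and then
-- tests all columns with one any() pass over the untouched inputs ('alternative').

-- ===== PORT A =====
-- A's while loop: repeatedly divmod all three numbers by 10, return True at the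
-- first column whose digit sum reaches 10.  The Nat argument of fGo is only a
-- fuel bound making the recursion structural; f supplies enough of it for every
-- input (x.toNat + y.toNat + z.toNat strictly decreases at each iteration), so
-- the 0-fuel branch is never reached.
def fGo : Nat → Int → Int → Int → Bool
  | 0, _, _, _ => false
  | n+1, x, y, z =>
    if x > 0 ∨ y > 0 ∨ z > 0 then
      if PySem.Int.mod x 10 + PySem.Int.mod y 10 + PySem.Int.mod z 10 ≥ 10 then true
      else fGo n (PySem.Int.floordiv x 10) (PySem.Int.floordiv y 10) (PySem.Int.floordiv z 10)
    else false

def f (x : Int) (y : Int) (z : Int) : Bool := fGo (x.toNat + y.toNat + z.toNat + 1) x y z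

-- ===== PORT B =====
-- the while loop of Source B that collects the place values 1, 10, 100, … ≤ m;
-- again the Nat argument is only fuel (p at least multiplies by 10 each step,
-- so m.toNat + 1 steps always suffice)
def bpGo : Nat → Int → Int → List Int
  | 0, _, _ => []
  | n+1, m, p => if p ≤ m then p :: bpGo n m (10 * p) else []

def buildPowers (m : Int) : List Int := bpGo (m.toNat + 1) m 1

def f_alt (x : Int) (y : Int) (z : Int) : Bool :=
  (buildPowers (max x (max y z))).any (fun p =>
    decide (PySem.Int.mod (PySem.Int.floordiv x p) 10
          + PySem.Int.mod (PySem.Int.floordiv y p) 10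
          + PySem.Int.mod (PySem.Int.floordiv z p) 10 ≥ 10))

-- ===== PRECONDITION & SPEC =====
def Spec_f (x : Int) (y : Int) (z : Int) (out : Bool) : Prop := out = f_alt x y z
instance (x : Int) (y : Int) (z : Int) (out : Bool) : Decidable (Spec_f x y z out) := by unfold Spec_f; infer_instance

-- ===== CLAIM (what is proved, stated in full; the proofs are below) =====
def Claim_equal_f : Prop := ∀ (x : Int) (y : Int) (z : Int), Dom_f x y z → Spec_f x y z (f x y z)

-- ===== LEMMAS AND PROOFS =====

-- main invariant: A's loop, started on the p-shifted numbers with enough fuel,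
-- agrees with B's any() over the remaining powers
theorem loop_eq_any (x y z : Int) : ∀ (nb n : Nat) (p : Int), 1 ≤ p →
    (PySem.Int.floordiv x p).toNat + (PySem.Int.floordiv y p).toNat
      + (PySem.Int.floordiv z p).toNat < n →
    max x (max y z) < p * (10:Int) ^ nb →
    fGo n (PySem.Int.floordiv x p) (PySem.Int.floordiv y p) (PySem.Int.floordiv z p) =
      (bpGo nb (max x (max y z)) p).any (fun q =>
        decide (PySem.Int.mod (PySem.Int.floordiv x q) 10
              + PySem.Int.mod (PySem.Int.floordiv y q) 10
              + PySem.Int.mod (PySem.Int.floordiv z q) 10 ≥ 10)) := by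
  intro nb
  induction nb with
  | zero =>
    intro n p hp hn hb
    simp only [pow_zero, mul_one] at hb
    have hxle : ¬ (1:Int) ≤ PySem.Int.floordiv x p := by
      rw [PySem.Int.le_floordiv_iff_mul_le (by omega), one_mul]; omega
    have hyle : ¬ (1:Int) ≤ PySem.Int.floordiv y p := by
      rw [PySem.Int.le_floordiv_iff_mul_le (by omega), one_mul]; omega
    have hzle : ¬ (1:Int) ≤ PySem.Int.floordiv z p := by
      rw [PySem.Int.le_floordiv_iff_mul_le (by omega), one_mul]; omega
    cases n with
    | zero => simp [bpGo, fGo]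
    | succ n => rw [fGo, if_neg (by omega)]; simp [bpGo]
  | succ nb IH =>
    intro n p hp hn hb
    have hp0 : (0:Int) < p := by omega
    have hxle : (1:Int) ≤ PySem.Int.floordiv x p ↔ p ≤ x := by
      rw [PySem.Int.le_floordiv_iff_mul_le hp0, one_mul]
    have hyle : (1:Int) ≤ PySem.Int.floordiv y p ↔ p ≤ y := by
      rw [PySem.Int.le_floordiv_iff_mul_le hp0, one_mul]
    have hzle : (1:Int) ≤ PySem.Int.floordiv z p ↔ p ≤ z := by
      rw [PySem.Int.le_floordiv_iff_mul_le hp0, one_mul]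
    rw [bpGo]
    by_cases hpm : p ≤ max x (max y z)
    · -- at least one shifted number is still positive: A's loop takes a step
      simp only [hpm, if_true, List.any_cons]
      have hcond : PySem.Int.floordiv x p > 0 ∨ PySem.Int.floordiv y p > 0 ∨
          PySem.Int.floordiv z p > 0 := by
        rcases max_cases x (max y z) with ⟨h1, _⟩ | ⟨h1, _⟩
        · left; omega
        · rcases max_cases y z with ⟨h2, _⟩ | ⟨h2, _⟩
          · right; left; omega
          · right; right; omega
      cases n with
      | zero => omega
      | succ n =>
        rw [fGo, if_pos hcond]
        by_cases hc : PySem.Int.mod (PySem.Int.floordiv x p) 10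
            + PySem.Int.mod (PySem.Int.floordiv y p) 10
            + PySem.Int.mod (PySem.Int.floordiv z p) 10 ≥ 10
        · have hc' := hc; simp at hc'; simp [hc']
        · -- no carry here: A recurses on the quotients, B moves to the next power
          have hcomp : ∀ a : Int, PySem.Int.floordiv (PySem.Int.floordiv a p) 10 =
              PySem.Int.floordiv a (10 * p) := by
            intro a
            rw [PySem.Int.floordiv_eq_ediv_of_pos hp0,
                PySem.Int.floordiv_eq_ediv_of_pos (by omega : (0:Int) < 10),
                PySem.Int.floordiv_eq_ediv_of_pos (by omega : (0:Int) < 10 * p),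
                Int.ediv_ediv_of_nonneg (by omega), mul_comm]
          simp only [hc, hcomp]
          have hmono : ∀ a : Int, (PySem.Int.floordiv a (10 * p)).toNat ≤
              (PySem.Int.floordiv a p).toNat ∧
              (0 < PySem.Int.floordiv a p →
                (PySem.Int.floordiv a (10 * p)).toNat < (PySem.Int.floordiv a p).toNat) := by
            intro a
            rw [← hcomp a, PySem.Int.floordiv_eq_ediv_of_pos (by omega : (0:Int) < 10)]
            omega
          have hx' := hmono x; have hy' := hmono y; have hz' := hmono z
          rw [IH n (10 * p) (by omega) (by omega)
            (by have : p * (10:Int) ^ (nb + 1) = 10 * p * (10:Int) ^ nb := by ring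
                omega)]
          simp
    · -- p exceeds every input: A's loop condition fails and B has no columns left
      rw [if_neg hpm]
      cases n with
      | zero => simp [fGo]
      | succ n => rw [fGo, if_neg (by omega)]; simp

-- ===== VERDICT (by name: the statement is the Claim_ definition above) =====
theorem f_spec : Claim_equal_f := by
  unfold Claim_equal_f Spec_f f f_alt buildPowers
  intro x y z _
  have hone : ∀ a : Int, PySem.Int.floordiv a 1 = a := by
    intro a
    rw [PySem.Int.floordiv_eq_ediv_of_pos (by omega : (0:Int) < 1), Int.ediv_one]
  have hpow : ∀ t : Nat, (t:Int) < (10:Int) ^ (t + 1) := by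
    intro t
    have h2 : t < 2 ^ (t + 1) := by
      have := Nat.lt_two_pow_self (n := t)
      have := Nat.pow_le_pow_right (by omega : 1 ≤ 2) (by omega : t ≤ t + 1)
      omega
    have h10 : (2:Nat) ^ (t + 1) ≤ 10 ^ (t + 1) :=
      Nat.pow_le_pow_left (by omega) _
    exact_mod_cast Nat.lt_of_lt_of_le h2 h10
  have h := loop_eq_any x y z ((max x (max y z)).toNat + 1)
      (x.toNat + y.toNat + z.toNat + 1) 1 (by omega)
      (by rw [hone, hone, hone]; omega)
      (by
        have := hpow (max x (max y z)).toNat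
        have : ((max x (max y z)).toNat : Int) < (10:Int) ^ ((max x (max y z)).toNat + 1) :=
          this
        omega)
  rw [hone, hone, hone] at h
  exact h
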